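-- pv_equiv track=rewrite | github.com/Thomas-Auvin/Projet-10 | rag/sql_tool.py | _has_top_level_limit
-- ===== SOURCE A (Python) =====
-- def _has_top_level_limit(sql_query: str) -> bool:
--     """
--     Détecte un LIMIT au niveau principal de la requête.
--     Ignore les LIMIT présents dans des sous-requêtes.
--     """
--     depth = 0
--     upper_sql = sql_query.upper()
--
--     i = 0
--     while i < len(upper_sql):
--         ch = upper_sql[i]
--
--         if ch == "(":
--             depth += 1
--         elif ch == ")":
--             depth = max(0, depth - 1)
--         elif depth == 0 and upper_sql.startswith("LIMIT", i):
--             before_ok = i == 0 or not upper_sql[i - 1].isalnum()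
--             after_idx = i + len("LIMIT")
--             after_ok = after_idx >= len(upper_sql) or not upper_sql[after_idx].isalnum()
--             if before_ok and after_ok:
--                 return True
--         i += 1
--
--     return False
-- ===== SOURCE B (Python) =====
-- def _has_top_level_limit(sql_query: str) -> bool:
--     upper = sql_query.upper()
--     n = len(upper)
--     # pass 1: clamped parenthesis depth before each index
--     depths = []
--     d = 0
--     for ch in upper:
--         depths.append(d)
--         if ch == "(":
--             d += 1
--         elif ch == ")":
--             d = max(0, d - 1)
--     # pass 2: look for a top-level, word-bounded LIMIT
--     return any(
--         depths[i] == 0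
--         and upper.startswith("LIMIT", i)
--         and (i == 0 or not upper[i - 1].isalnum())
--         and (i + 5 >= n or not upper[i + 5].isalnum())
--         for i in range(n)
--     )
-- ===== Notes on version B (the rewrite author's own statement) =====
-- stated objective: alternative
-- what changed: Replaces the single stateful while-loop (depth tracking interleaved with keyword testing and early return) by two separate passes: a scan building a depth table, then an any() over all indices testing depth==0 plus word boundaries.
import Mathlib
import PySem

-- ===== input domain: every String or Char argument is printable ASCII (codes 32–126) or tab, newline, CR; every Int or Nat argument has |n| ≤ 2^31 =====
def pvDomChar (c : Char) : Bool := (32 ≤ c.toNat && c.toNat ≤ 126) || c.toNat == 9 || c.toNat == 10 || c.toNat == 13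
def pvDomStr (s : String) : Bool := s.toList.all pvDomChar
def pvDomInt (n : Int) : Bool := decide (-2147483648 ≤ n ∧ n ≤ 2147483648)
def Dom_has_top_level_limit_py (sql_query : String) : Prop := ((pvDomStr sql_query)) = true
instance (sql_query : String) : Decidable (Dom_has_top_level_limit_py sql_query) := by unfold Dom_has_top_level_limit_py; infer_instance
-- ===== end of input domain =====

-- B replaces A's single stateful scan by a depth-table pass plus a separate keyword search pass (alternative decomposition, same result).

-- ===== PORT A =====
-- A: while-loop over index i with a running clamped depth, early return on a match.
def pvLoopA (cs : List Char) (i : Nat) (depth : Int) : Bool :=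
  if i < cs.length then
    let ch := cs.getD i ' '
    if ch = '(' then pvLoopA cs (i+1) (depth+1)
    else if ch = ')' then pvLoopA cs (i+1) (max 0 (depth-1))
    else if depth = 0 ∧ PySem.Chars.startswith (cs.drop i) ['L','I','M','I','T'] then
      if (decide (i = 0) || !PySem.Chars.isalnum (cs.getD (i-1) ' '))
          && (decide (i + 5 ≥ cs.length) || !PySem.Chars.isalnum (cs.getD (i+5) ' ')) then true
      else pvLoopA cs (i+1) depth
    else pvLoopA cs (i+1) depth
  else false
  termination_by cs.length - i

def has_top_level_limit_py (sql_query : String) : Bool :=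
  pvLoopA (PySem.Chars.upper sql_query.toList) 0 0

-- ===== PORT B =====
-- B pass 1: the clamped depth accumulated from the characters before each index.
def pvDepths (cs : List Char) (d : Int) : List Int :=
  match cs with
  | [] => []
  | c :: t => d :: pvDepths t (if c = '(' then d + 1 else if c = ')' then max 0 (d - 1) else d)

-- B pass 2: the per-index test of the any(...) generator.
def pvCheckB (cs : List Char) (depths : List Int) (i : Nat) : Bool :=
  (depths.getD i 0 == 0)
  && PySem.Chars.startswith (cs.drop i) ['L','I','M','I','T']
  && (decide (i = 0) || !PySem.Chars.isalnum (cs.getD (i-1) ' '))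
  && (decide (i + 5 ≥ cs.length) || !PySem.Chars.isalnum (cs.getD (i+5) ' '))

def has_top_level_limit_py_alt (sql_query : String) : Bool :=
  let cs := PySem.Chars.upper sql_query.toList
  (List.range cs.length).any (pvCheckB cs (pvDepths cs 0))

-- ===== PRECONDITION & SPEC =====
def Spec_has_top_level_limit_py (sql_query : String) (out : Bool) : Prop := out = has_top_level_limit_py_alt sql_query
instance (sql_query : String) (out : Bool) : Decidable (Spec_has_top_level_limit_py sql_query out) := by unfold Spec_has_top_level_limit_py; infer_instance

-- ===== CLAIM (what is proved, stated in full; the proofs are below) =====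
def Claim_equal_has_top_level_limit_py : Prop := ∀ (sql_query : String), Dom_has_top_level_limit_py sql_query → Spec_has_top_level_limit_py sql_query (has_top_level_limit_py sql_query)

-- ===== LEMMAS AND PROOFS =====

def pvStep (d : Int) (c : Char) : Int :=
  if c = '(' then d + 1 else if c = ')' then max 0 (d - 1) else d

lemma pvDepths_getD (cs : List Char) (d : Int) (i : Nat) (h : i < cs.length) :
    (pvDepths cs d).getD i 0 = (cs.take i).foldl pvStep d := by
  induction cs generalizing d i with
  | nil => simp at h
  | cons c t ih =>
    cases i with
    | zero => simp [pvDepths]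
    | succ j =>
      simp only [pvDepths, List.getD_cons_succ, List.take_succ_cons, List.foldl_cons]
      exact ih _ j (by simpa using h)

lemma pvLoopA_eq_any (cs : List Char) (i : Nat) (d : Int)
    (hd : d = (cs.take i).foldl pvStep 0) :
    pvLoopA cs i d = (List.range' i (cs.length - i)).any (pvCheckB cs (pvDepths cs 0)) := by
  by_cases h : i < cs.length
  · have hrange : List.range' i (cs.length - i) = i :: List.range' (i+1) (cs.length - (i+1)) := by
      have : cs.length - i = (cs.length - (i+1)) + 1 := by omega
      rw [this, List.range'_succ]
    have htake : cs.take (i+1) = cs.take i ++ [cs.getD i ' '] := by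
      rw [List.take_add_one, List.getElem?_eq_getElem h, List.getD_eq_getElem cs ' ' h]
      rfl
    have hdep : (pvDepths cs 0).getD i 0 = d := by rw [pvDepths_getD cs 0 i h, hd]
    have hstep : (cs.take (i+1)).foldl pvStep 0 = pvStep d (cs.getD i ' ') := by
      rw [htake, List.foldl_append, ← hd]; simp
    have hdrop : cs.drop i = cs.getD i ' ' :: cs.drop (i+1) := by
      rw [List.getD_eq_getElem cs ' ' h]
      exact List.drop_eq_getElem_cons h
    rw [hrange]
    by_cases hpar : cs.getD i ' ' = '('
    · have hcheck : pvCheckB cs (pvDepths cs 0) i = false := by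
        simp only [pvCheckB, hdrop, hpar]
        simp [PySem.Chars.startswith]
      rw [pvLoopA]
      simp only [h, if_true, hpar, List.any_cons, hcheck, Bool.false_or]
      exact pvLoopA_eq_any cs (i+1) (d+1) (by rw [hstep]; unfold pvStep; rw [if_pos hpar])
    · by_cases hpar2 : cs.getD i ' ' = ')'
      · have hcheck : pvCheckB cs (pvDepths cs 0) i = false := by
          simp only [pvCheckB, hdrop, hpar2]
          simp [PySem.Chars.startswith]
        rw [pvLoopA]
        simp only [h, if_true, hpar2, List.any_cons, hcheck, Bool.false_or]
        exact pvLoopA_eq_any cs (i+1) (max 0 (d-1))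
          (by rw [hstep]; unfold pvStep; rw [if_neg hpar, if_pos hpar2])
      · have hstep' : pvStep d (cs.getD i ' ') = d := by
          simp only [pvStep, if_neg hpar, if_neg hpar2]
        have IH : pvLoopA cs (i+1) d
            = (List.range' (i+1) (cs.length - (i+1))).any (pvCheckB cs (pvDepths cs 0)) :=
          pvLoopA_eq_any cs (i+1) d (by rw [hstep, hstep'])
        rw [pvLoopA]
        simp only [h, if_true, if_neg hpar, if_neg hpar2, List.any_cons, IH]
        by_cases hd0 : d = 0
        · by_cases hsw : PySem.Chars.startswith (cs.drop i) ['L','I','M','I','T'] = true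
          · by_cases hb1 : (decide (i = 0) || !PySem.Chars.isalnum (cs.getD (i-1) ' ')) = true
            · by_cases hb2 : (decide (i + 5 ≥ cs.length)
                  || !PySem.Chars.isalnum (cs.getD (i+5) ' ')) = true
              · have hcheck : pvCheckB cs (pvDepths cs 0) i = true := by
                  simp only [pvCheckB, hdep, hd0, hsw, hb1, hb2]
                  simp
                rw [if_pos ⟨hd0, hsw⟩, if_pos (by rw [hb1, hb2]; rfl), hcheck]
                simp
              · have hcheck : pvCheckB cs (pvDepths cs 0) i = false := by
                  simp only [pvCheckB, hdep, Bool.eq_false_iff.mpr hb2]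
                  simp
                rw [if_pos ⟨hd0, hsw⟩,
                  if_neg (by intro hc; rw [Bool.eq_false_iff.mpr hb2] at hc; simp at hc),
                  hcheck, Bool.false_or]
            · have hcheck : pvCheckB cs (pvDepths cs 0) i = false := by
                simp only [pvCheckB, hdep, Bool.eq_false_iff.mpr hb1]
                simp
              rw [if_pos ⟨hd0, hsw⟩,
                if_neg (by intro hc; rw [Bool.eq_false_iff.mpr hb1] at hc; simp at hc),
                hcheck, Bool.false_or]
          · have hcheck : pvCheckB cs (pvDepths cs 0) i = false := by
              simp only [pvCheckB, hdep, Bool.eq_false_iff.mpr hsw]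
              simp
            rw [if_neg (by tauto), hcheck, Bool.false_or]
        · have hcheck : pvCheckB cs (pvDepths cs 0) i = false := by
            simp only [pvCheckB, hdep]
            simp [hd0]
          rw [if_neg (by tauto), hcheck, Bool.false_or]
  · have h1 : cs.length - i = 0 := by omega
    rw [pvLoopA]
    simp [h, h1]
  termination_by cs.length - i

-- ===== VERDICT (by name: the statement is the Claim_ definition above) =====
theorem has_top_level_limit_py_spec : Claim_equal_has_top_level_limit_py := by
  intro s _
  unfold Spec_has_top_level_limit_py has_top_level_limit_py has_top_level_limit_py_alt
  rw [pvLoopA_eq_any _ 0 0 (by simp)]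
  simp [List.range_eq_range']
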